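-- pv_equiv track=rewrite | github.com/vishk23/arbiter | benchmarks/kd_v3.1_mini_full/imo_1992_p1.py | _search_solutions
-- ===== SOURCE A (Python) =====
-- def _search_solutions(limit=40):
--     sols = []
--     for p in range(2, limit + 1):
--         for q in range(p + 1, limit + 1):
--             for r in range(q + 1, limit + 1):
--                 lhs = (p - 1) * (q - 1) * (r - 1)
--                 rhs = p * q * r - 1
--                 if rhs % lhs == 0:
--                     sols.append((p, q, r, rhs // lhs))
--     return sols
-- ===== SOURCE B (Python) =====
-- def _search_solutions(limit=40):
--     # For fixed p < q, (pqr-1) = k*(p-1)(q-1)(r-1) forces k in {2, 3}; solve the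
--     # resulting linear equation for r instead of scanning all r.  O(limit^2).
--     sols = []
--     for p in range(2, limit + 1):
--         for q in range(p + 1, limit + 1):
--             e = (p - 1) * (q - 1)
--             for k in (3, 2):
--                 d = k * e - p * q
--                 if d > 0 and (k * e - 1) % d == 0:
--                     r = (k * e - 1) // d
--                     if q < r <= limit:
--                         sols.append((p, q, r, k))
--     return sols
-- ===== Notes on version B (the rewrite author's own statement) =====
-- stated objective: faster
-- what changed: The inner scan over all r is replaced by bounding the quotient (pqr-1)/((p-1)(q-1)(r-1)) to two possible integer values and solving the resulting linear equation for r in constant time per (p,q) pair.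
import Mathlib
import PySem

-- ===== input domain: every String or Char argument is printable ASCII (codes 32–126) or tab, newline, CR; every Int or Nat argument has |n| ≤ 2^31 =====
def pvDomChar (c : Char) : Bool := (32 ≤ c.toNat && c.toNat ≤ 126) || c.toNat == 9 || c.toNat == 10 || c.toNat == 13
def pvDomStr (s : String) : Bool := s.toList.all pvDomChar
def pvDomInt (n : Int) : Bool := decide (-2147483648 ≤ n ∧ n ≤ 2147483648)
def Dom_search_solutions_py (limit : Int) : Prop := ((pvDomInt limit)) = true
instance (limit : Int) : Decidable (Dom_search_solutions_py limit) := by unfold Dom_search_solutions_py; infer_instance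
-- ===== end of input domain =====

-- B replaces A's inner scan over r by bounding the quotient k of (pqr-1) by (p-1)(q-1)(r-1) and solving a linear equation for r: faster (asymptotic).

-- ===== PORT A =====
def search_solutions_py (limit : Int) : List (List Int) :=
  (PySem.List.pyRange 2 (limit + 1) 1).foldl (fun sols p =>
    (PySem.List.pyRange (p + 1) (limit + 1) 1).foldl (fun sols q =>
      (PySem.List.pyRange (q + 1) (limit + 1) 1).foldl (fun sols r =>
        let lhs := (p - 1) * (q - 1) * (r - 1)
        let rhs := p * q * r - 1
        if PySem.Int.mod rhs lhs = 0 then sols ++ [[p, q, r, PySem.Int.floordiv rhs lhs]] else sols)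
        sols) sols) []

-- ===== PORT B =====
def search_solutions_py_alt (limit : Int) : List (List Int) :=
  (PySem.List.pyRange 2 (limit + 1) 1).foldl (fun sols p =>
    (PySem.List.pyRange (p + 1) (limit + 1) 1).foldl (fun sols q =>
      let e := (p - 1) * (q - 1)
      ([3, 2] : List Int).foldl (fun sols k =>
        let d := k * e - p * q
        if 0 < d ∧ PySem.Int.mod (k * e - 1) d = 0 then
          let r := PySem.Int.floordiv (k * e - 1) d
          if q < r ∧ r ≤ limit then sols ++ [[p, q, r, k]] else sols
        else sols) sols) sols) []

-- ===== PRECONDITION & SPEC =====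
def Spec_search_solutions_py (limit : Int) (out : List (List Int)) : Prop := out = search_solutions_py_alt limit
instance (limit : Int) (out : List (List Int)) : Decidable (Spec_search_solutions_py limit out) := by unfold Spec_search_solutions_py; infer_instance

-- ===== CLAIM (what is proved, stated in full; the proofs are below) =====
def Claim_equal_search_solutions_py : Prop := ∀ (limit : Int), Dom_search_solutions_py limit → Spec_search_solutions_py limit (search_solutions_py limit)

-- ===== LEMMAS AND PROOFS =====

-- basic facts about admissible (p, q, r)
theorem pv_quot (p q k r : Int) (hp : 2 ≤ p) (hq : p + 1 ≤ q) (hr : q + 1 ≤ r)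
    (heq : p * q * r - 1 = (p - 1) * (q - 1) * (r - 1) * k) :
    PySem.Int.floordiv (p * q * r - 1) ((p - 1) * (q - 1) * (r - 1)) = k := by
  have hlhs : 0 < (p - 1) * (q - 1) * (r - 1) :=
    mul_pos (mul_pos (by omega) (by omega)) (by omega)
  rw [PySem.Int.floordiv_eq_ediv_of_pos hlhs, heq, mul_comm,
    Int.mul_ediv_cancel _ (ne_of_gt hlhs)]

theorem pv_bwd (p q k r : Int)
    (hlin : r * (k * ((p - 1) * (q - 1)) - p * q) = k * ((p - 1) * (q - 1)) - 1) :
    p * q * r - 1 = (p - 1) * (q - 1) * (r - 1) * k := by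
  linear_combination -hlin

theorem pv_fwd (p q : Int) (hp : 2 ≤ p) (hq : p + 1 ≤ q) :
    ∀ r : Int, q + 1 ≤ r → ((p - 1) * (q - 1) * (r - 1)) ∣ (p * q * r - 1) →
      ∃ k : Int, (k = 3 ∨ k = 2) ∧ 0 < k * ((p - 1) * (q - 1)) - p * q ∧
        r * (k * ((p - 1) * (q - 1)) - p * q) = k * ((p - 1) * (q - 1)) - 1 := by
  intro r hr hdvd
  have h1 : (0:Int) < p - 1 := by omega
  have h2 : (0:Int) < q - 1 := by omega
  have h3 : (0:Int) < r - 1 := by omega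
  have hlhs : 0 < (p - 1) * (q - 1) * (r - 1) := mul_pos (mul_pos h1 h2) h3
  obtain ⟨k, hk⟩ := hdvd
  have hlow : (p - 1) * (q - 1) * (r - 1) * 1 < (p - 1) * (q - 1) * (r - 1) * k := by
    nlinarith [hk, mul_pos h1 h2, mul_pos h2 h3, mul_pos h1 h3]
  have ha : p ≤ 2 * (p - 1) := by omega
  have hb : 2 * q ≤ 3 * (q - 1) := by omega
  have hc : 3 * r ≤ 4 * (r - 1) := by omega
  have m1 : p * (2 * q) ≤ (2 * (p - 1)) * (3 * (q - 1)) := by nlinarith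
  have m2 : (p * (2 * q)) * (3 * r) ≤ ((2 * (p - 1)) * (3 * (q - 1))) * (4 * (r - 1)) := by
    nlinarith [m1]
  have hhigh : (p - 1) * (q - 1) * (r - 1) * k < (p - 1) * (q - 1) * (r - 1) * 4 := by
    nlinarith [hk, m2]
  have hk1 : 1 < k := lt_of_mul_lt_mul_left hlow (le_of_lt hlhs)
  have hk4 : k < 4 := lt_of_mul_lt_mul_left hhigh (le_of_lt hlhs)
  have hk23 : k = 3 ∨ k = 2 := by omega
  have hlin : r * (k * ((p - 1) * (q - 1)) - p * q) = k * ((p - 1) * (q - 1)) - 1 := by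
    linear_combination -hk
  refine ⟨k, hk23, ?_, hlin⟩
  have hke : 4 ≤ k * ((p - 1) * (q - 1)) := by
    rcases hk23 with h | h <;> subst h <;> nlinarith
  nlinarith [hlin]

theorem pv_cge2 (p q k c : Int) (hp : 2 ≤ p) (hq : p + 1 ≤ q) (hk : k = 3 ∨ k = 2)
    (hd : 0 < k * ((p - 1) * (q - 1)) - p * q)
    (hc : c * (k * ((p - 1) * (q - 1)) - p * q) = k * ((p - 1) * (q - 1)) - 1) : 2 ≤ c := by
  have hpq : 6 ≤ p * q := by nlinarith
  by_contra hlt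
  push_neg at hlt
  have h1 : (1 - c) * (k * ((p - 1) * (q - 1)) - p * q) ≥ 0 :=
    mul_nonneg (by omega) (le_of_lt hd)
  nlinarith [hc, hd, hpq, h1]

theorem pv_order (p q c3 c2 : Int) (hp : 2 ≤ p) (hq : p + 1 ≤ q)
    (hd3 : 0 < 3 * ((p - 1) * (q - 1)) - p * q) (hd2 : 0 < 2 * ((p - 1) * (q - 1)) - p * q)
    (hc3 : c3 * (3 * ((p - 1) * (q - 1)) - p * q) = 3 * ((p - 1) * (q - 1)) - 1)
    (hc2 : c2 * (2 * ((p - 1) * (q - 1)) - p * q) = 2 * ((p - 1) * (q - 1)) - 1) : c3 < c2 := by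
  have he : 2 ≤ (p - 1) * (q - 1) := by nlinarith
  have h3ge : 2 ≤ c3 := pv_cge2 p q 3 c3 hp hq (Or.inl rfl) hd3 hc3
  have key : (c3 - c2) * (2 * ((p - 1) * (q - 1)) - p * q) = ((p - 1) * (q - 1)) * (1 - c3) := by
    linear_combination hc3 - hc2
  nlinarith [key, hd2, h3ge, he]
theorem pv_filter_map_two {α : Type} (lo hi : Int) (pred : Int → Bool) (f : Int → α)
    (c3 c2 : Int) (h32 : c3 < c2)
    (hch : ∀ r, lo ≤ r → r < hi → (pred r = true ↔ (r = c3 ∨ r = c2))) :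
    ((PySem.List.pyRange lo hi 1).filter pred).map f =
      (if lo ≤ c3 ∧ c3 < hi then [f c3] else []) ++ (if lo ≤ c2 ∧ c2 < hi then [f c2] else []) := by
  by_cases hle : hi ≤ lo
  · rw [PySem.List.pyRange_one_eq_nil hle, if_neg (by omega), if_neg (by omega)]
    simp
  · push_neg at hle
    induction h : (hi - lo).toNat generalizing hi with
    | zero => omega
    | succ n ih =>
      have hm : lo ≤ hi - 1 := by omega
      have hsplit : PySem.List.pyRange lo hi 1 = PySem.List.pyRange lo (hi - 1) 1 ++ [hi - 1] := by
        have := PySem.List.pyRange_one_succ_right (a := lo) (b := hi - 1) hm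
        simpa using this
      have hmid : (List.filter pred [hi - 1]).map f =
          (if hi - 1 = c3 ∨ hi - 1 = c2 then [f (hi - 1)] else []) := by
        have hiff := hch (hi - 1) hm (by omega)
        by_cases hc : hi - 1 = c3 ∨ hi - 1 = c2
        · rw [if_pos hc]; simp [List.filter, hiff.2 hc]
        · rw [if_neg hc]
          have hf : pred (hi - 1) = false := by
            cases hpb : pred (hi - 1)
            · rfl
            · exact absurd (hiff.1 hpb) hc
          simp [List.filter, hf]
      rw [hsplit, List.filter_append, List.map_append, hmid]
      have hpre : ((PySem.List.pyRange lo (hi - 1) 1).filter pred).map f =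
          (if lo ≤ c3 ∧ c3 < hi - 1 then [f c3] else []) ++
            (if lo ≤ c2 ∧ c2 < hi - 1 then [f c2] else []) := by
        by_cases hlo' : hi - 1 ≤ lo
        · rw [PySem.List.pyRange_one_eq_nil hlo', if_neg (by omega), if_neg (by omega)]
          simp
        · push_neg at hlo'
          exact ih (hi - 1) (fun r h1 h2 => hch r h1 (by omega)) hlo' (by omega)
      rw [hpre]
      clear ih hch hmid hsplit h hle
      by_cases hc3 : hi - 1 = c3
      · rw [if_pos (Or.inl hc3)]
        subst hc3
        split_ifs <;> first | (exfalso; omega) | simp_all | simp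
      · by_cases hc2 : hi - 1 = c2
        · rw [if_pos (Or.inr hc2)]
          subst hc2
          split_ifs <;> first | (exfalso; omega) | simp_all
        · rw [if_neg (show ¬(hi - 1 = c3 ∨ hi - 1 = c2) from fun h => h.elim hc3 hc2)]
          split_ifs <;> first | (exfalso; omega) | simp_all

theorem pv_filter_two_app {α : Type} (lo hi : Int) (pred : Int → Bool) (f : Int → α)
    (c3 c2 : Int) (h32 : c3 < c2)
    (hch : ∀ r, lo ≤ r → r < hi → (pred r = true ↔ (r = c3 ∨ r = c2)))
    (P3 P2 : Prop) [Decidable P3] [Decidable P2] (o3 o2 : α)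
    (hiff3 : P3 ↔ (lo ≤ c3 ∧ c3 < hi)) (hiff2 : P2 ↔ (lo ≤ c2 ∧ c2 < hi))
    (ho3 : P3 → f c3 = o3) (ho2 : P2 → f c2 = o2) :
    ((PySem.List.pyRange lo hi 1).filter pred).map f =
      (if P3 then [o3] else []) ++ (if P2 then [o2] else []) := by
  rw [pv_filter_map_two lo hi pred f c3 c2 h32 hch]
  congr 1
  · by_cases h : P3
    · rw [if_pos h, if_pos (hiff3.1 h), ho3 h]
    · rw [if_neg h, if_neg (fun hh => h (hiff3.2 hh))]
  · by_cases h : P2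
    · rw [if_pos h, if_pos (hiff2.1 h), ho2 h]
    · rw [if_neg h, if_neg (fun hh => h (hiff2.2 hh))]

theorem pv_inner (limit p q : Int) (hp : 2 ≤ p) (hq : p + 1 ≤ q) :
    ((PySem.List.pyRange (q + 1) (limit + 1) 1).filter
        (fun r => decide (PySem.Int.mod (p * q * r - 1) ((p - 1) * (q - 1) * (r - 1)) = 0))).map
      (fun r => [p, q, r, PySem.Int.floordiv (p * q * r - 1) ((p - 1) * (q - 1) * (r - 1))]) =
    (if 0 < 3 * ((p - 1) * (q - 1)) - p * q ∧
        PySem.Int.mod (3 * ((p - 1) * (q - 1)) - 1) (3 * ((p - 1) * (q - 1)) - p * q) = 0 ∧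
        q < PySem.Int.floordiv (3 * ((p - 1) * (q - 1)) - 1) (3 * ((p - 1) * (q - 1)) - p * q) ∧
        PySem.Int.floordiv (3 * ((p - 1) * (q - 1)) - 1) (3 * ((p - 1) * (q - 1)) - p * q) ≤ limit then
      [[p, q, PySem.Int.floordiv (3 * ((p - 1) * (q - 1)) - 1) (3 * ((p - 1) * (q - 1)) - p * q), 3]]
    else []) ++
    (if 0 < 2 * ((p - 1) * (q - 1)) - p * q ∧
        PySem.Int.mod (2 * ((p - 1) * (q - 1)) - 1) (2 * ((p - 1) * (q - 1)) - p * q) = 0 ∧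
        q < PySem.Int.floordiv (2 * ((p - 1) * (q - 1)) - 1) (2 * ((p - 1) * (q - 1)) - p * q) ∧
        PySem.Int.floordiv (2 * ((p - 1) * (q - 1)) - 1) (2 * ((p - 1) * (q - 1)) - p * q) ≤ limit then
      [[p, q, PySem.Int.floordiv (2 * ((p - 1) * (q - 1)) - 1) (2 * ((p - 1) * (q - 1)) - p * q), 2]]
    else []) := by
  by_cases s3 : 0 < 3 * ((p - 1) * (q - 1)) - p * q ∧
      (3 * ((p - 1) * (q - 1)) - p * q) ∣ (3 * ((p - 1) * (q - 1)) - 1) <;>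
  by_cases s2 : 0 < 2 * ((p - 1) * (q - 1)) - p * q ∧
      (2 * ((p - 1) * (q - 1)) - p * q) ∣ (2 * ((p - 1) * (q - 1)) - 1)
  · -- both solvable
    set c3 := PySem.Int.floordiv (3 * ((p - 1) * (q - 1)) - 1) (3 * ((p - 1) * (q - 1)) - p * q) with hc3def
    set c2 := PySem.Int.floordiv (2 * ((p - 1) * (q - 1)) - 1) (2 * ((p - 1) * (q - 1)) - p * q) with hc2def
    have hm3 : c3 * (3 * ((p - 1) * (q - 1)) - p * q) = 3 * ((p - 1) * (q - 1)) - 1 := by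
      rw [hc3def, PySem.Int.floordiv_eq_ediv_of_pos s3.1]; exact Int.ediv_mul_cancel s3.2
    have hm2 : c2 * (2 * ((p - 1) * (q - 1)) - p * q) = 2 * ((p - 1) * (q - 1)) - 1 := by
      rw [hc2def, PySem.Int.floordiv_eq_ediv_of_pos s2.1]; exact Int.ediv_mul_cancel s2.2
    refine pv_filter_two_app (q + 1) (limit + 1) _ _ c3 c2
      (pv_order p q c3 c2 hp hq s3.1 s2.1 hm3 hm2) ?_ _ _ _ _ ?_ ?_ ?_ ?_
    · intro r h1 h2
      simp only [decide_eq_true_eq, PySem.Int.mod_eq_zero_iff_dvd]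
      constructor
      · intro hd
        obtain ⟨k, hk23, hdk, hlin⟩ := pv_fwd p q hp hq r (by omega) hd
        rcases hk23 with rfl | rfl
        · exact Or.inl (mul_right_cancel₀ (ne_of_gt s3.1) (hlin.trans hm3.symm))
        · exact Or.inr (mul_right_cancel₀ (ne_of_gt s2.1) (hlin.trans hm2.symm))
      · rintro (rfl | rfl)
        · exact ⟨3, pv_bwd p q 3 _ hm3⟩
        · exact ⟨2, pv_bwd p q 2 _ hm2⟩
    · constructor
      · rintro ⟨-, -, h3, h4⟩; exact ⟨by omega, by omega⟩
      · rintro ⟨h1, h2⟩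
        exact ⟨s3.1, (PySem.Int.mod_eq_zero_iff_dvd _ _).2 s3.2, by omega, by omega⟩
    · constructor
      · rintro ⟨-, -, h3, h4⟩; exact ⟨by omega, by omega⟩
      · rintro ⟨h1, h2⟩
        exact ⟨s2.1, (PySem.Int.mod_eq_zero_iff_dvd _ _).2 s2.2, by omega, by omega⟩
    · rintro ⟨-, -, h3, -⟩
      rw [pv_quot p q 3 c3 hp hq (by omega) (pv_bwd p q 3 c3 hm3)]
    · rintro ⟨-, -, h3, -⟩
      rw [pv_quot p q 2 c2 hp hq (by omega) (pv_bwd p q 2 c2 hm2)]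
  · -- only k = 3 solvable
    set c3 := PySem.Int.floordiv (3 * ((p - 1) * (q - 1)) - 1) (3 * ((p - 1) * (q - 1)) - p * q) with hc3def
    set cd := max (c3 + 1) (limit + 1) with hcddef
    have hm3 : c3 * (3 * ((p - 1) * (q - 1)) - p * q) = 3 * ((p - 1) * (q - 1)) - 1 := by
      rw [hc3def, PySem.Int.floordiv_eq_ediv_of_pos s3.1]; exact Int.ediv_mul_cancel s3.2
    refine pv_filter_two_app (q + 1) (limit + 1) _ _ c3 cd (by omega) ?_ _ _ _ _ ?_ ?_ ?_ ?_
    · intro r h1 h2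
      simp only [decide_eq_true_eq, PySem.Int.mod_eq_zero_iff_dvd]
      constructor
      · intro hd
        obtain ⟨k, hk23, hdk, hlin⟩ := pv_fwd p q hp hq r (by omega) hd
        rcases hk23 with rfl | rfl
        · exact Or.inl (mul_right_cancel₀ (ne_of_gt s3.1) (hlin.trans hm3.symm))
        · exact absurd ⟨hdk, ⟨r, by linear_combination -hlin⟩⟩ s2
      · rintro (rfl | rfl)
        · exact ⟨3, pv_bwd p q 3 _ hm3⟩
        · exact absurd h2 (by omega)
    · constructor
      · rintro ⟨-, -, h3, h4⟩; exact ⟨by omega, by omega⟩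
      · rintro ⟨h1, h2⟩
        exact ⟨s3.1, (PySem.Int.mod_eq_zero_iff_dvd _ _).2 s3.2, by omega, by omega⟩
    · constructor
      · rintro ⟨hd2, hv2, -, -⟩
        exact absurd ⟨hd2, (PySem.Int.mod_eq_zero_iff_dvd _ _).1 hv2⟩ s2
      · rintro ⟨h1, h2⟩; exact absurd h2 (by omega)
    · rintro ⟨-, -, h3, -⟩
      rw [pv_quot p q 3 c3 hp hq (by omega) (pv_bwd p q 3 c3 hm3)]
    · rintro ⟨hd2, hv2, -, -⟩
      exact absurd ⟨hd2, (PySem.Int.mod_eq_zero_iff_dvd _ _).1 hv2⟩ s2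
  · -- only k = 2 solvable
    set c2 := PySem.Int.floordiv (2 * ((p - 1) * (q - 1)) - 1) (2 * ((p - 1) * (q - 1)) - p * q) with hc2def
    set cd := min (q - 1) (c2 - 1) with hcddef
    have hm2 : c2 * (2 * ((p - 1) * (q - 1)) - p * q) = 2 * ((p - 1) * (q - 1)) - 1 := by
      rw [hc2def, PySem.Int.floordiv_eq_ediv_of_pos s2.1]; exact Int.ediv_mul_cancel s2.2
    refine pv_filter_two_app (q + 1) (limit + 1) _ _ cd c2 (by omega) ?_ _ _ _ _ ?_ ?_ ?_ ?_
    · intro r h1 h2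
      simp only [decide_eq_true_eq, PySem.Int.mod_eq_zero_iff_dvd]
      constructor
      · intro hd
        obtain ⟨k, hk23, hdk, hlin⟩ := pv_fwd p q hp hq r (by omega) hd
        rcases hk23 with rfl | rfl
        · exact absurd ⟨hdk, ⟨r, by linear_combination -hlin⟩⟩ s3
        · exact Or.inr (mul_right_cancel₀ (ne_of_gt s2.1) (hlin.trans hm2.symm))
      · rintro (rfl | rfl)
        · exact absurd h1 (by omega)
        · exact ⟨2, pv_bwd p q 2 _ hm2⟩
    · constructor
      · rintro ⟨hd3, hv3, -, -⟩
        exact absurd ⟨hd3, (PySem.Int.mod_eq_zero_iff_dvd _ _).1 hv3⟩ s3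
      · rintro ⟨h1, h2⟩; exact absurd h1 (by omega)
    · constructor
      · rintro ⟨-, -, h3, h4⟩; exact ⟨by omega, by omega⟩
      · rintro ⟨h1, h2⟩
        exact ⟨s2.1, (PySem.Int.mod_eq_zero_iff_dvd _ _).2 s2.2, by omega, by omega⟩
    · rintro ⟨hd3, hv3, -, -⟩
      exact absurd ⟨hd3, (PySem.Int.mod_eq_zero_iff_dvd _ _).1 hv3⟩ s3
    · rintro ⟨-, -, h3, -⟩
      rw [pv_quot p q 2 c2 hp hq (by omega) (pv_bwd p q 2 c2 hm2)]
  · -- neither solvable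
    refine pv_filter_two_app (q + 1) (limit + 1) _ _ (q - 2) (q - 1) (by omega) ?_ _ _ _ _ ?_ ?_ ?_ ?_
    · intro r h1 h2
      simp only [decide_eq_true_eq, PySem.Int.mod_eq_zero_iff_dvd]
      constructor
      · intro hd
        obtain ⟨k, hk23, hdk, hlin⟩ := pv_fwd p q hp hq r (by omega) hd
        rcases hk23 with rfl | rfl
        · exact absurd ⟨hdk, ⟨r, by linear_combination -hlin⟩⟩ s3
        · exact absurd ⟨hdk, ⟨r, by linear_combination -hlin⟩⟩ s2
      · rintro (rfl | rfl)
        · exact absurd h1 (by omega)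
        · exact absurd h1 (by omega)
    · constructor
      · rintro ⟨hd3, hv3, -, -⟩
        exact absurd ⟨hd3, (PySem.Int.mod_eq_zero_iff_dvd _ _).1 hv3⟩ s3
      · rintro ⟨h1, h2⟩; exact absurd h1 (by omega)
    · constructor
      · rintro ⟨hd2, hv2, -, -⟩
        exact absurd ⟨hd2, (PySem.Int.mod_eq_zero_iff_dvd _ _).1 hv2⟩ s2
      · rintro ⟨h1, h2⟩; exact absurd h1 (by omega)
    · rintro ⟨hd3, hv3, -, -⟩
      exact absurd ⟨hd3, (PySem.Int.mod_eq_zero_iff_dvd _ _).1 hv3⟩ s3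
    · rintro ⟨hd2, hv2, -, -⟩
      exact absurd ⟨hd2, (PySem.Int.mod_eq_zero_iff_dvd _ _).1 hv2⟩ s2

-- ===== VERDICT (by name: the statement is the Claim_ definition above) =====
theorem search_solutions_py_spec : Claim_equal_search_solutions_py := by
  intro limit _
  unfold Spec_search_solutions_py search_solutions_py search_solutions_py_alt
  apply PySem.List.foldl_congr_mem
  intro acc p hpmem
  have hp : 2 ≤ p := (PySem.List.mem_pyRange_one.1 hpmem).1
  apply PySem.List.foldl_congr_mem
  intro acc' q hqmem
  have hq : p + 1 ≤ q := (PySem.List.mem_pyRange_one.1 hqmem).1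
  have hstep : ∀ (init : List (List Int)) (k : Int),
      (if 0 < k * ((p - 1) * (q - 1)) - p * q ∧
          PySem.Int.mod (k * ((p - 1) * (q - 1)) - 1) (k * ((p - 1) * (q - 1)) - p * q) = 0 then
        if q < PySem.Int.floordiv (k * ((p - 1) * (q - 1)) - 1) (k * ((p - 1) * (q - 1)) - p * q) ∧
            PySem.Int.floordiv (k * ((p - 1) * (q - 1)) - 1) (k * ((p - 1) * (q - 1)) - p * q) ≤ limit then
          init ++ [[p, q, PySem.Int.floordiv (k * ((p - 1) * (q - 1)) - 1) (k * ((p - 1) * (q - 1)) - p * q), k]]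
        else init
      else init) =
      init ++ (if 0 < k * ((p - 1) * (q - 1)) - p * q ∧
          PySem.Int.mod (k * ((p - 1) * (q - 1)) - 1) (k * ((p - 1) * (q - 1)) - p * q) = 0 ∧
          q < PySem.Int.floordiv (k * ((p - 1) * (q - 1)) - 1) (k * ((p - 1) * (q - 1)) - p * q) ∧
          PySem.Int.floordiv (k * ((p - 1) * (q - 1)) - 1) (k * ((p - 1) * (q - 1)) - p * q) ≤ limit then
        [[p, q, PySem.Int.floordiv (k * ((p - 1) * (q - 1)) - 1) (k * ((p - 1) * (q - 1)) - p * q), k]]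
      else []) := by
    intro init k
    split_ifs <;> first | rfl | tauto | simp
  simp only [List.foldl_cons, List.foldl_nil]
  rw [PySem.List.foldl_append_ite
      (fun r => PySem.Int.mod (p * q * r - 1) ((p - 1) * (q - 1) * (r - 1)) = 0)
      (fun r => [p, q, r, PySem.Int.floordiv (p * q * r - 1) ((p - 1) * (q - 1) * (r - 1))])]
  rw [hstep, hstep, List.append_assoc]
  exact congrArg _ (pv_inner limit p q hp hq)
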